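-- pv_equiv track=rewrite | github.com/rotimulak/pays | backend/src/services/notification_service.py | should_notify_low_balance
-- ===== SOURCE A (Python) =====
-- def should_notify_low_balance(
--
--     balance_after: int,
--     last_notified: int | None,
--     thresholds: list[int] | None = None,
-- ) -> int | None:
--     """Check if low balance notification should be sent.
--
--     Args:
--         balance_after: Balance after spending
--         last_notified: Last threshold that was notified
--         thresholds: Balance thresholds for notifications
--
--     Returns:
--         Threshold to notify at, or None if no notification needed
--     """
--     if thresholds is None:
--         thresholds = [50, 20, 10, 5]
--
--     # Sort descending
--     thresholds = sorted(thresholds, reverse=True)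
--
--     for threshold in thresholds:
--         # Balance crossed below threshold
--         if balance_after <= threshold:
--             # Haven't notified for this or lower threshold yet
--             if last_notified is None or last_notified > threshold:
--                 return threshold
--
--     return None
-- ===== SOURCE B (Python) =====
-- def should_notify_low_balance(
--     balance_after: int,
--     last_notified: int | None,
--     thresholds: list[int] | None = None,
-- ) -> int | None:
--     """Same result without sorting: pick the largest crossed, not-yet-notified threshold."""
--     if thresholds is None:
--         thresholds = [50, 20, 10, 5]
--     candidates = [
--         t for t in thresholds
--         if balance_after <= t and (last_notified is None or last_notified > t)
--     ]
--     return max(candidates) if candidates else None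
-- ===== Notes on version B (the rewrite author's own statement) =====
-- stated objective: simpler
-- what changed: Replaces sort-descending-then-return-first-match with a single filter of candidate thresholds followed by max(), eliminating the sort.
import Mathlib
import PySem

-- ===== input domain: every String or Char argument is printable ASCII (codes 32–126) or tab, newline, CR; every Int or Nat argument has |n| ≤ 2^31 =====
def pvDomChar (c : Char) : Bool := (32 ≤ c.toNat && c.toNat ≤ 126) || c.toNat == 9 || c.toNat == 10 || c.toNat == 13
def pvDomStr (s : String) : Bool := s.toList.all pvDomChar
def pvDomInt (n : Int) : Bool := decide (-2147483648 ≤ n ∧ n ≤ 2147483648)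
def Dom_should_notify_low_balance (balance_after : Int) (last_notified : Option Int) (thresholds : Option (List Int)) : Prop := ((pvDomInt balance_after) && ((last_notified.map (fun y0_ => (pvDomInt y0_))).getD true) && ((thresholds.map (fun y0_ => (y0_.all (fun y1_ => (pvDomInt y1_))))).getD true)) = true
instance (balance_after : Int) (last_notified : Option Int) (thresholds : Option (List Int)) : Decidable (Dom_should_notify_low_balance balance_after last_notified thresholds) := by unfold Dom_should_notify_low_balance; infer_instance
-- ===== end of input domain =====

-- B replaces A's sort-descending-then-first-match by filter-the-candidates-then-max (no sort); equal return value proved on all inputs.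

-- ===== PORT A =====
-- 'for threshold in thresholds: …' of A (first match wins, else None)
def pvLoopA (balance_after : Int) (last_notified : Option Int) : List Int → Option Int
  | [] => none
  | t :: rest =>
      if balance_after ≤ t then
        if (match last_notified with | none => true | some v => decide (t < v)) then some t
        else pvLoopA balance_after last_notified rest
      else pvLoopA balance_after last_notified rest

def should_notify_low_balance (balance_after : Int) (last_notified : Option Int) (thresholds : Option (List Int)) : Option Int :=
  let ts := thresholds.getD [50, 20, 10, 5]
  let ts := PySem.List.sorted ts (fun x => x) true   -- sorted(thresholds, reverse=True)
  pvLoopA balance_after last_notified ts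

-- ===== PORT B =====
def should_notify_low_balance_alt (balance_after : Int) (last_notified : Option Int) (thresholds : Option (List Int)) : Option Int :=
  let ts := thresholds.getD [50, 20, 10, 5]
  let candidates := ts.filter (fun t => decide (balance_after ≤ t) && (match last_notified with | none => true | some v => decide (t < v)))
  PySem.List.max? candidates (fun x => x)   -- max(candidates) if candidates else None

-- ===== PRECONDITION & SPEC =====
def Spec_should_notify_low_balance (balance_after : Int) (last_notified : Option Int) (thresholds : Option (List Int)) (out : Option Int) : Prop := out = should_notify_low_balance_alt balance_after last_notified thresholds
instance (balance_after : Int) (last_notified : Option Int) (thresholds : Option (List Int)) (out : Option Int) : Decidable (Spec_should_notify_low_balance balance_after last_notified thresholds out) := by unfold Spec_should_notify_low_balance; infer_instance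

-- ===== CLAIM (what is proved, stated in full; the proofs are below) =====
def Claim_equal_should_notify_low_balance : Prop := ∀ (balance_after : Int) (last_notified : Option Int) (thresholds : Option (List Int)), Dom_should_notify_low_balance balance_after last_notified thresholds → Spec_should_notify_low_balance balance_after last_notified thresholds (should_notify_low_balance balance_after last_notified thresholds)

-- ===== LEMMAS AND PROOFS =====

-- the candidate predicate both programs test
def pvCand (balance_after : Int) (last_notified : Option Int) (t : Int) : Bool :=
  decide (balance_after ≤ t) && (match last_notified with | none => true | some v => decide (t < v))

-- A's loop is first-match (find?) of the candidate predicate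
theorem pvLoopA_eq_find? (b : Int) (ln : Option Int) (xs : List Int) :
    pvLoopA b ln xs = xs.find? (pvCand b ln) := by
  induction xs with
  | nil => rfl
  | cons t rest ih =>
      simp only [pvLoopA, List.find?, pvCand]
      by_cases h1 : b ≤ t
      · simp only [h1, decide_true, Bool.true_and, if_true]
        cases ln with
        | none => simp
        | some v =>
            by_cases h2 : t < v
            · simp [h2]
            · simp [h2, ih]
      · simp [h1, ih]

-- on a descending list, every satisfying element is ≤ the first satisfying element
theorem find?_isMax_of_desc (p : Int → Bool) (xs : List Int)
    (hs : xs.Pairwise (fun a b => b ≤ a)) {m : Int} (hm : xs.find? p = some m) :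
    ∀ y ∈ xs, p y = true → y ≤ m := by
  induction xs with
  | nil => simp at hm
  | cons a t ih =>
      rcases List.pairwise_cons.mp hs with ⟨ha, ht⟩
      by_cases hpa : p a = true
      · simp [List.find?, hpa] at hm
        subst hm
        intro y hy _
        rcases List.mem_cons.mp hy with rfl | hyt
        · exact le_refl _
        · exact ha y hyt
      · simp only [List.find?, hpa] at hm
        intro y hy hpy
        rcases List.mem_cons.mp hy with rfl | hyt
        · exact absurd hpy hpa
        · exact ih ht hm y hyt hpy

-- max? (key = id) is determined by being a maximal member
theorem max?_eq_some_of_isMax {xs : List Int} {m : Int}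
    (hmem : m ∈ xs) (hmax : ∀ y ∈ xs, y ≤ m) :
    PySem.List.max? xs (fun x => x) = some m := by
  cases hx : PySem.List.max? xs (fun x => x) with
  | none =>
      rw [PySem.List.max?_eq_none_iff] at hx
      subst hx; simp at hmem
  | some m' =>
      have hm' := PySem.List.max?_mem hx
      have h1 : m ≤ m' := PySem.List.max?_isMax hx m hmem
      have h2 : m' ≤ m := hmax m' hm'
      exact congrArg some (le_antisymm h2 h1)

theorem should_notify_low_balance_eq (b : Int) (ln : Option Int) (thresholds : Option (List Int)) :
    should_notify_low_balance b ln thresholds = should_notify_low_balance_alt b ln thresholds := by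
  unfold should_notify_low_balance should_notify_low_balance_alt
  show pvLoopA b ln (PySem.List.sorted (thresholds.getD [50, 20, 10, 5]) (fun x => x) true)
      = PySem.List.max? ((thresholds.getD [50, 20, 10, 5]).filter (pvCand b ln)) (fun x => x)
  generalize thresholds.getD [50, 20, 10, 5] = ts
  set s := PySem.List.sorted ts (fun x => x) true with hsdef
  have hperm : ∀ x : Int, x ∈ s ↔ x ∈ ts := fun x => PySem.List.mem_sorted ts (fun x => x) true x
  have hdesc : s.Pairwise (fun a c => c ≤ a) := PySem.List.sorted_pairwise_rev ts (fun x => x)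
  rw [pvLoopA_eq_find?]
  cases hf : s.find? (pvCand b ln) with
  | none =>
      have hnone : ∀ y ∈ s, ¬ (pvCand b ln y = true) := by
        intro y hy
        exact (List.find?_eq_none.mp hf) y hy
      have : ts.filter (pvCand b ln) = [] := by
        apply List.filter_eq_nil_iff.mpr
        intro y hy
        exact hnone y ((hperm y).mpr hy)
      rw [this]
      exact ((PySem.List.max?_eq_none_iff [] (fun x => x)).mpr rfl).symm
  | some m =>
      have hpm : pvCand b ln m = true := List.find?_some hf
      have hms : m ∈ s := List.mem_of_find?_eq_some hf
      symm
      apply max?_eq_some_of_isMax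
      · exact List.mem_filter.mpr ⟨(hperm m).mp hms, hpm⟩
      · intro y hy
        rcases List.mem_filter.mp hy with ⟨hyts, hpy⟩
        exact find?_isMax_of_desc (pvCand b ln) s hdesc hf y ((hperm y).mpr hyts) hpy

-- ===== VERDICT (by name: the statement is the Claim_ definition above) =====
theorem should_notify_low_balance_spec : Claim_equal_should_notify_low_balance := by
  intro b ln ts _
  unfold Spec_should_notify_low_balance
  exact should_notify_low_balance_eq b ln ts
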